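-- pv_equiv track=rewrite | github.com/Adithya-Vedula/VVADITHYA | CODE/ex20.py | calculate_word_potential
-- ===== SOURCE A (Python) =====
-- def calculate_word_potential(word):
--     potential = 0
--     for char in word:
--         if 'A' <= char <= 'Z':
--             potential += ord(char) - ord('A') + 65  # Calculate ASCII value and add 65
--         elif 'a' <= char <= 'z':
--             potential += ord(char) - ord('a') + 65  # Calculate ASCII value and add 65
--         else:
--             return -1  # Invalid character in the word
--     return potential
-- ===== SOURCE B (Python) =====
-- def calculate_word_potential(word):
--     freq = {}
--     for c in word:
--         freq[c] = freq.get(c, 0) + 1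
--     total = 0
--     for c, n in freq.items():
--         o = ord(c)
--         if 65 <= o <= 90:
--             total += o * n
--         elif 97 <= o <= 122:
--             total += (o - 32) * n
--         else:
--             return -1
--     return total
-- ===== Notes on version B (the rewrite author's own statement) =====
-- stated objective: alternative
-- what changed: Replaces A's per-character fused validate-and-accumulate loop by a frequency dictionary: one pass builds character multiplicities, then a loop over the distinct characters validates each once and adds its uppercase code times its multiplicity; with few distinct characters the validate/accumulate work runs once per distinct character.
import Mathlib
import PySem

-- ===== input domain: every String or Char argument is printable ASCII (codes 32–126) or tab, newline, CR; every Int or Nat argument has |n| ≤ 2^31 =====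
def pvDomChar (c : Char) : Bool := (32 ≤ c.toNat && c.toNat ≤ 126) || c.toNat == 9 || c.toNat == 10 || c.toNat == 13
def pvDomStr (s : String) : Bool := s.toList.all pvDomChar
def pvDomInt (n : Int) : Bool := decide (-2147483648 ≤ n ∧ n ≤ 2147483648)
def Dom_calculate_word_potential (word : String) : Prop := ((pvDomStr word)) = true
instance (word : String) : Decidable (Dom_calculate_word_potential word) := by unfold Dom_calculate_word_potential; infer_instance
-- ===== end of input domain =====

-- B replaces A's per-character fused validate-and-accumulate loop by a frequency
-- dictionary: distinct characters are validated once and contribute code × multiplicity.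

-- ===== PORT A =====
-- early-exit loop: walk the characters with an accumulator; on a non-letter return -1
def pvA_loop : List Char → Int → Int
  | [], potential => potential
  | c :: cs, potential =>
    if 'A' ≤ c ∧ c ≤ 'Z' then
      pvA_loop cs (potential + ((c.toNat : Int) - ('A'.toNat : Int) + 65))
    else if 'a' ≤ c ∧ c ≤ 'z' then
      pvA_loop cs (potential + ((c.toNat : Int) - ('a'.toNat : Int) + 65))
    else
      -1

def calculate_word_potential (word : String) : Int :=
  pvA_loop word.toList 0

-- ===== PORT B =====
-- second loop of Source B: for c, n in freq.items(): validate via ord codes, add value × count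
def pvB_loop : List (Char × Int) → Int → Int
  | [], total => total
  | (c, n) :: ps, total =>
    let o : Int := (c.toNat : Int)
    if 65 ≤ o ∧ o ≤ 90 then
      pvB_loop ps (total + o * n)
    else if 97 ≤ o ∧ o ≤ 122 then
      pvB_loop ps (total + (o - 32) * n)
    else
      -1

def calculate_word_potential_alt (word : String) : Int :=
  -- first loop of Source B: freq[c] = freq.get(c, 0) + 1
  let freq : PySem.Dict Char Int :=
    word.toList.foldl (fun d c => d.insert c (d.getD c 0 + 1)) PySem.Dict.empty
  pvB_loop freq.items 0

-- ===== PRECONDITION & SPEC =====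
def Spec_calculate_word_potential (word : String) (out : Int) : Prop := out = calculate_word_potential_alt word
instance (word : String) (out : Int) : Decidable (Spec_calculate_word_potential word out) := by unfold Spec_calculate_word_potential; infer_instance

-- ===== CLAIM (what is proved, stated in full; the proofs are below) =====
def Claim_equal_calculate_word_potential : Prop := ∀ (word : String), Dom_calculate_word_potential word → Spec_calculate_word_potential word (calculate_word_potential word)

-- ===== LEMMAS AND PROOFS =====

-- common value and validity functions for the characterisations of both loops
def pvVal (c : Char) : Int :=
  if 97 ≤ (c.toNat : Int) ∧ (c.toNat : Int) ≤ 122 then (c.toNat : Int) - 32 else (c.toNat : Int)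

def pvIsLetter (c : Char) : Bool :=
  (65 ≤ (c.toNat : Int) ∧ (c.toNat : Int) ≤ 90) ∨ (97 ≤ (c.toNat : Int) ∧ (c.toNat : Int) ≤ 122)

theorem pv_upper_iff (c : Char) : ('A' ≤ c ∧ c ≤ 'Z') ↔ (65 ≤ (c.toNat : Int) ∧ (c.toNat : Int) ≤ 90) := by
  rw [Char.le_def, Char.le_def, UInt32.le_iff_toNat_le, UInt32.le_iff_toNat_le]
  have h : c.toNat = c.val.toNat := rfl
  rw [h]
  have hA : ('A' : Char).val.toNat = 65 := rfl
  have hZ : ('Z' : Char).val.toNat = 90 := rfl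
  rw [hA, hZ]
  omega

theorem pv_lower_iff (c : Char) : ('a' ≤ c ∧ c ≤ 'z') ↔ (97 ≤ (c.toNat : Int) ∧ (c.toNat : Int) ≤ 122) := by
  rw [Char.le_def, Char.le_def, UInt32.le_iff_toNat_le, UInt32.le_iff_toNat_le]
  have h : c.toNat = c.val.toNat := rfl
  rw [h]
  have ha : ('a' : Char).val.toNat = 97 := rfl
  have hz : ('z' : Char).val.toNat = 122 := rfl
  rw [ha, hz]
  omega

-- A's loop computes: -1 on any invalid char, else acc + Σ pvVal
theorem pvA_loop_char : ∀ (cs : List Char) (acc : Int),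
    pvA_loop cs acc =
      if cs.all pvIsLetter then acc + (cs.map pvVal).sum else -1 := by
  intro cs
  induction cs with
  | nil => intro acc; simp [pvA_loop]
  | cons c cs ih =>
    intro acc
    simp only [pvA_loop, List.all_cons, List.map_cons, List.sum_cons]
    by_cases hU : 'A' ≤ c ∧ c ≤ 'Z'
    · have hU' := (pv_upper_iff c).mp hU
      have hL' : ¬ (97 ≤ (c.toNat : Int) ∧ (c.toNat : Int) ≤ 122) := by omega
      have hlet : pvIsLetter c = true := by simp [pvIsLetter]; omega
      rw [if_pos hU, ih]
      simp only [hlet, Bool.true_and]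
      split_ifs with h
      · simp only [pvVal, if_neg hL']
        have hA : ('A'.toNat : Int) = 65 := by decide
        rw [hA]; ring
      · rfl
    · by_cases hLo : 'a' ≤ c ∧ c ≤ 'z'
      · have hLo' := (pv_lower_iff c).mp hLo
        have hlet : pvIsLetter c = true := by simp [pvIsLetter]; omega
        rw [if_neg hU, if_pos hLo, ih]
        simp only [hlet, Bool.true_and]
        split_ifs with h
        · simp only [pvVal, if_pos hLo']
          have : ('a'.toNat : Int) = 97 := by decide
          rw [this]; ring
        · rfl
      · have hU' := (pv_upper_iff c).not.mp hU
        have hLo' := (pv_lower_iff c).not.mp hLo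
        have hlet : pvIsLetter c = false := by
          simp [pvIsLetter]; omega
        rw [if_neg hU, if_neg hLo]
        simp [hlet]

-- B's loop computes: -1 on any invalid key, else acc + Σ pvVal(key) * mult
theorem pvB_loop_char : ∀ (ps : List (Char × Int)) (acc : Int),
    pvB_loop ps acc =
      if ps.all (fun p => pvIsLetter p.1) then
        acc + (ps.map (fun p => pvVal p.1 * p.2)).sum
      else -1 := by
  intro ps
  induction ps with
  | nil => intro acc; simp [pvB_loop]
  | cons p ps ih =>
    intro acc
    obtain ⟨c, n⟩ := p
    simp only [pvB_loop, List.all_cons, List.map_cons, List.sum_cons]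
    by_cases hU : 65 ≤ (c.toNat : Int) ∧ (c.toNat : Int) ≤ 90
    · have hL : ¬ (97 ≤ (c.toNat : Int) ∧ (c.toNat : Int) ≤ 122) := by omega
      have hlet : pvIsLetter c = true := by simp [pvIsLetter]; omega
      rw [if_pos hU, ih]
      simp only [hlet, Bool.true_and]
      split_ifs with h
      · simp only [pvVal, if_neg hL]; ring
      · rfl
    · by_cases hLo : 97 ≤ (c.toNat : Int) ∧ (c.toNat : Int) ≤ 122
      · have hlet : pvIsLetter c = true := by simp [pvIsLetter]; omega
        rw [if_neg hU, if_pos hLo, ih]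
        simp only [hlet, Bool.true_and]
        split_ifs with h
        · simp only [pvVal, if_pos hLo]; ring
        · rfl
      · have hlet : pvIsLetter c = false := by simp [pvIsLetter]; omega
        rw [if_neg hU, if_neg hLo]
        simp [hlet]

-- indicator sum over a nodup list containing c
theorem pv_sum_indicator (f : Char → Int) (c : Char) :
    ∀ (ds : List Char), ds.Nodup → c ∈ ds →
      (ds.map (fun k => if k = c then f k else 0)).sum = f c := by
  intro ds
  induction ds with
  | nil => intro _ h; cases h
  | cons d ds ih =>
    intro hnd hmem
    simp only [List.map_cons, List.sum_cons]
    rcases List.mem_cons.mp hmem with h | h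
    · -- h : c = d
      have hz : (ds.map (fun k => if k = c then f k else 0)).sum = 0 := by
        apply List.sum_eq_zero
        intro x hx
        obtain ⟨k, hk, rfl⟩ := List.mem_map.mp hx
        have hne : k ≠ c := fun he => (List.nodup_cons.mp hnd).1 ((he.trans h) ▸ hk)
        simp [hne]
      rw [if_pos h.symm, hz, add_zero]
      exact congrArg f h.symm
    · have hd : d ≠ c := fun he => (List.nodup_cons.mp hnd).1 (he ▸ h)
      rw [if_neg hd, ih (List.nodup_cons.mp hnd).2 h]
      ring

-- grouping: Σ over distinct keys of value × count = Σ over the list of values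
theorem pv_sum_group (ds : List Char) (hnd : ds.Nodup) :
    ∀ (cs : List Char), (∀ x ∈ cs, x ∈ ds) →
      (ds.map (fun k => pvVal k * (cs.count k : Int))).sum = (cs.map pvVal).sum := by
  intro cs
  induction cs with
  | nil => intro _; simp
  | cons c cs ih =>
    intro hsub
    have hc : c ∈ ds := hsub c (List.mem_cons_self ..)
    have hsub' : ∀ x ∈ cs, x ∈ ds := fun x hx => hsub x (List.mem_cons_of_mem _ hx)
    simp only [List.map_cons, List.sum_cons]
    have hcount : ∀ k, ((c :: cs).count k : Int) = (cs.count k : Int) + (if k = c then 1 else 0) := by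
      intro k
      by_cases h : k = c
      · subst h; simp
      · simp [h, Ne.symm h]
    calc (ds.map (fun k => pvVal k * ((c :: cs).count k : Int))).sum
        = (ds.map (fun k => pvVal k * (cs.count k : Int) + (if k = c then pvVal k else 0))).sum := by
          apply congrArg
          apply List.map_congr_left
          intro k _
          rw [hcount k]
          rcases eq_or_ne k c with h | h
          · simp only [if_pos h]
            ring
          · simp only [if_neg h]
            ring
      _ = (ds.map (fun k => pvVal k * (cs.count k : Int))).sum +
            (ds.map (fun k => if k = c then pvVal k else 0)).sum := by
          rw [← List.sum_map_add]
      _ = (cs.map pvVal).sum + pvVal c := by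
          rw [ih hsub', pv_sum_indicator pvVal c ds hnd hc]
      _ = pvVal c + (cs.map pvVal).sum := by ring

-- all over the distinct-character set equals all over the characters
theorem pv_all_ofList (cs : List Char) :
    (PySem.Set.ofList cs).all pvIsLetter = cs.all pvIsLetter := by
  rcases h : cs.all pvIsLetter with _ | _
  · rw [List.all_eq_false] at h ⊢
    obtain ⟨x, hx, hpx⟩ := h
    exact ⟨x, (PySem.Set.mem_ofList cs x).mpr hx, hpx⟩
  · rw [List.all_eq_true] at h ⊢
    intro x hx
    exact h x ((PySem.Set.mem_ofList cs x).mp hx)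

-- ===== VERDICT (by name: the statement is the Claim_ definition above) =====
theorem calculate_word_potential_spec : Claim_equal_calculate_word_potential := by
  intro word _
  unfold Spec_calculate_word_potential calculate_word_potential calculate_word_potential_alt
  rw [pvA_loop_char]
  simp only [PySem.Dict.foldl_insert_getD_add_one_eq_counter, PySem.Dict.items_counter]
  rw [pvB_loop_char]
  set cs := word.toList with hcs
  have hall : ((PySem.Set.ofList cs).map (fun k => (k, (cs.count k : Int)))).all
      (fun p => pvIsLetter p.1) = cs.all pvIsLetter := by
    rw [List.all_map]
    simpa using pv_all_ofList cs
  rw [hall]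
  split_ifs with h
  · rw [List.map_map]
    have := pv_sum_group (PySem.Set.ofList cs) (PySem.Set.nodup_ofList cs) cs
      (fun x hx => (PySem.Set.mem_ofList cs x).mpr hx)
    simp only [Function.comp_def] at *
    rw [this]
  · rfl
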